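-- pv_equiv track=rewrite | github.com/skatzrskx55q/start | utils.py | _split_filter_values
-- ===== SOURCE A (Python) =====
-- def _split_filter_values(value: str, split_newline: bool = True, split_pipe: bool = True):
--     if value is None:
--         return []
--     text = str(value).strip()
--     if not text:
--         return []
--     # Support configurable separators for filter values.
--     parts = []
--     chunks = text.split("\n") if split_newline else [text]
--     for chunk in chunks:
--         candidate_parts = chunk.split("|") if split_pipe else [chunk]
--         for part in candidate_parts:
--             part = part.strip()
--             if part:
--                 parts.append(part)
--     return parts
-- ===== SOURCE B (Python) =====
-- def _split_filter_values(value: str, split_newline: bool = True, split_pipe: bool = True):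
--     if value is None:
--         return []
--     text = str(value).strip()
--     if not text:
--         return []
--     parts = []
--     cur = []
--     for ch in text:
--         if (split_newline and ch == "\n") or (split_pipe and ch == "|"):
--             tok = "".join(cur).strip()
--             if tok:
--                 parts.append(tok)
--             cur = []
--         else:
--             cur.append(ch)
--     tok = "".join(cur).strip()
--     if tok:
--         parts.append(tok)
--     return parts
-- ===== Notes on version B (the rewrite author's own statement) =====
-- stated objective: alternative
-- what changed: Replaced the nested newline-split-then-pipe-split passes (which build intermediate chunk lists) with a single character-level scan that cuts tokens at whichever separator characters are active, stripping and filtering each token as it is emitted.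
import Mathlib
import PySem

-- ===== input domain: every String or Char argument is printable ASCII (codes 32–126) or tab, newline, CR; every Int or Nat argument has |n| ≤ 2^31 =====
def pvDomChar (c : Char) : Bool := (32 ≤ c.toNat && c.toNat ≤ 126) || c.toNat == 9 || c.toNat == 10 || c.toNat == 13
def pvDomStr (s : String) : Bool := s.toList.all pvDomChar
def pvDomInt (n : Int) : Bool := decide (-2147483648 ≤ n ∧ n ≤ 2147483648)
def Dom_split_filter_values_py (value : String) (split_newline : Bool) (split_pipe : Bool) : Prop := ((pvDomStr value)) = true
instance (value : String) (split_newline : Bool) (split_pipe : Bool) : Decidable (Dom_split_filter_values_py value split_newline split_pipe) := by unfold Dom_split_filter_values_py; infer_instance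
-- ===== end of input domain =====

-- B replaces A's nested newline-split-then-pipe-split passes with one character-level scan
-- that cuts tokens at whichever separators are active (objective: alternative, same cost).

-- ===== PORT A =====
-- literal transliteration of A: strip, empty guard, split on newlines (or keep whole text),
-- then each chunk split on pipes (or kept), each part stripped and appended if nonempty.
def split_filter_values_py (value : String) (split_newline : Bool) (split_pipe : Bool) : List String :=
  let text := PySem.Str.strip value
  if text = "" then []
  else
    let chunks : List (List Char) :=
      if split_newline then PySem.Chars.splitOn text.toList ['\n'] else [text.toList]
    chunks.foldl (fun parts chunk =>
      let cands : List (List Char) :=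
        if split_pipe then PySem.Chars.splitOn chunk ['|'] else [chunk]
      cands.foldl (fun parts part =>
        let part2 := PySem.Chars.strip part
        if part2 ≠ [] then parts ++ [String.ofList part2] else parts) parts) []

-- ===== PORT B =====
-- tok = "".join(cur).strip(); if tok: [tok] else []
def pvEmit (cur : List Char) : List String :=
  let tok := PySem.Chars.strip cur
  if tok ≠ [] then [String.ofList tok] else []

-- literal transliteration of B (Source B): one pass over the characters with a current-token
-- accumulator; at an active separator the stripped token is emitted if nonempty.
def split_filter_values_py_alt (value : String) (split_newline : Bool) (split_pipe : Bool) : List String :=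
  let text := PySem.Str.strip value
  if text = "" then []
  else
    let st := text.toList.foldl
      (fun (st : List String × List Char) ch =>
        if (split_newline && ch == '\n') || (split_pipe && ch == '|') then
          (st.1 ++ pvEmit st.2, ([] : List Char))
        else (st.1, st.2 ++ [ch])) ([], [])
    st.1 ++ pvEmit st.2

-- ===== PRECONDITION & SPEC =====
def Spec_split_filter_values_py (value : String) (split_newline : Bool) (split_pipe : Bool) (out : List String) : Prop := out = split_filter_values_py_alt value split_newline split_pipe
instance (value : String) (split_newline : Bool) (split_pipe : Bool) (out : List String) : Decidable (Spec_split_filter_values_py value split_newline split_pipe out) := by unfold Spec_split_filter_values_py; infer_instance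

-- ===== CLAIM (what is proved, stated in full; the proofs are below) =====
def Claim_equal_split_filter_values_py : Prop := ∀ (value : String) (split_newline : Bool) (split_pipe : Bool), Dom_split_filter_values_py value split_newline split_pipe → Spec_split_filter_values_py value split_newline split_pipe (split_filter_values_py value split_newline split_pipe)

-- ===== LEMMAS AND PROOFS =====

theorem pvBeqNl (x : Char) : ('\n' == x) = (x == '\n') := by
  by_cases h : x = '\n' <;> simp [h, eq_comm]

theorem pvBeqPipe (x : Char) : ('|' == x) = (x == '|') := by
  by_cases h : x = '|' <;> simp [h, eq_comm]

theorem pvSplitOnP_append {α : Type} (p : α → Bool) (pre l : List α)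
    (h : ∀ x ∈ pre, p x = false) :
    (pre ++ l).splitOnP p = (l.splitOnP p).modifyHead (pre ++ ·) := by
  induction pre with
  | nil =>
    cases h' : l.splitOnP p with
    | nil => exact absurd h' (List.splitOnP_ne_nil p l)
    | cons a t => simp [h', List.modifyHead]
  | cons a pre ih =>
    have ha : p a = false := h a (by simp)
    have hrest : ∀ x ∈ pre, p x = false := fun x hx => h x (by simp [hx])
    rw [List.cons_append, List.splitOnP_cons, ha]
    simp only [Bool.false_eq_true, if_false, ih hrest]
    cases h' : l.splitOnP p with
    | nil => exact absurd h' (List.splitOnP_ne_nil p l)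
    | cons b t => simp [List.modifyHead]

theorem pvGo (c : Char) (fuel : Nat) (l cur : List Char) (acc : List (List Char))
    (hf : l.length < fuel) (hc : ∀ x ∈ cur, (c == x) = false) :
    PySem.Chars.splitOn.go [c] fuel l cur acc
      = acc.reverse ++ ((cur.reverse ++ l).splitOnP (fun x => c == x)) := by
  induction fuel generalizing l cur acc with
  | zero => omega
  | succ fuel ih =>
    cases l with
    | nil =>
      rw [PySem.Chars.splitOn.go]
      rw [pvSplitOnP_append (fun x => c == x) cur.reverse []
        (fun x hx => hc x (List.mem_reverse.mp hx))]
      simp [List.modifyHead]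
      omega
    | cons x rest =>
      rw [PySem.Chars.splitOn.go]
      have hpre : [c].isPrefixOf (x :: rest) = (c == x) := by
        simp [List.isPrefixOf]
      rw [hpre]
      by_cases h : (c == x) = true
      · rw [if_pos h]
        simp only [List.length_singleton, List.drop_succ_cons, List.drop_zero]
        rw [ih rest [] (cur.reverse :: acc)
          (by simp at hf; omega) (by simp)]
        rw [pvSplitOnP_append (fun x => c == x) cur.reverse (x :: rest)
          (fun y hy => hc y (List.mem_reverse.mp hy))]
        rw [List.splitOnP_cons, if_pos h]
        cases hs : (rest.splitOnP fun x => c == x) with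
        | nil => exact absurd hs (List.splitOnP_ne_nil _ rest)
        | cons b t => simp [hs, List.modifyHead]
      · rw [if_neg h]
        rw [ih rest (x :: cur) acc (by simp at hf ⊢; omega)
          (by intro y hy; rcases List.mem_cons.mp hy with h' | h'
              · subst h'; simpa using h
              · exact hc y h')]
        rw [show (x :: cur).reverse ++ rest = cur.reverse ++ (x :: rest) by simp]

theorem pvSplitOn_eq (c : Char) (l : List Char) :
    PySem.Chars.splitOn l [c] = l.splitOnP (fun x => c == x) := by
  unfold PySem.Chars.splitOn
  rw [pvGo c (l.length + 1) l [] [] (by omega) (by simp)]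
  simp

theorem pvSplitOnP_or {α : Type} (p q : α → Bool) (l : List α) :
    (l.splitOnP p).flatMap (List.splitOnP q) = l.splitOnP (fun x => p x || q x) := by
  induction l with
  | nil => simp [List.splitOnP_nil]
  | cons x xs ih =>
    rw [List.splitOnP_cons, List.splitOnP_cons (fun x => p x || q x)]
    by_cases hp : p x = true
    · simp [hp, List.splitOnP_nil, ih]
    · rw [if_neg hp]
      cases hs : xs.splitOnP p with
      | nil => exact absurd hs (List.splitOnP_ne_nil p xs)
      | cons h t =>
        rw [hs] at ih
        by_cases hq : q x = true
        · simp only [hp, hq, Bool.false_or, if_pos hq]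
          simp only [List.modifyHead, List.flatMap_cons, List.splitOnP_cons, if_pos hq]
          rw [← ih]
          simp [List.flatMap_cons]
        · simp only [hp, hq, Bool.false_or, if_neg hq]
          simp only [List.modifyHead, List.flatMap_cons, List.splitOnP_cons, if_neg hq]
          rw [← ih]
          cases hqs : h.splitOnP q with
          | nil => exact absurd hqs (List.splitOnP_ne_nil q h)
          | cons b u => simp only [List.flatMap_cons, hqs]; simp [List.modifyHead]

-- A's inner strip-and-append fold is a flatMap of pvEmit
theorem pvInnerFold (pieces : List (List Char)) (parts : List String) :
    pieces.foldl (fun parts part =>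
        let part2 := PySem.Chars.strip part
        if part2 ≠ [] then parts ++ [String.ofList part2] else parts) parts
      = parts ++ pieces.flatMap pvEmit := by
  induction pieces generalizing parts with
  | nil => simp
  | cons p ps ih =>
    simp only [List.foldl_cons, List.flatMap_cons, ih, pvEmit]
    by_cases h : PySem.Chars.strip p = [] <;> simp [h]

-- B's one-pass fold over the characters, flushed at the end, is the flatMap of pvEmit
-- over the pieces cut by the separator predicate (head piece prefixed by the pending token).
theorem pvBFold (sep : Char → Bool) (l : List Char) (parts : List String) (cur : List Char) :
    (l.foldl (fun (st : List String × List Char) ch =>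
        if sep ch then (st.1 ++ pvEmit st.2, ([] : List Char))
        else (st.1, st.2 ++ [ch])) (parts, cur)).1
      ++ pvEmit (l.foldl (fun (st : List String × List Char) ch =>
        if sep ch then (st.1 ++ pvEmit st.2, ([] : List Char))
        else (st.1, st.2 ++ [ch])) (parts, cur)).2
      = parts ++ ((l.splitOnP sep).modifyHead (cur ++ ·)).flatMap pvEmit := by
  induction l generalizing parts cur with
  | nil => simp [List.splitOnP_nil, List.modifyHead]
  | cons x xs ih =>
    rw [List.foldl_cons, List.splitOnP_cons]
    by_cases h : sep x = true
    · rw [if_pos h, if_pos h, ih]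
      cases hs : xs.splitOnP sep with
      | nil => exact absurd hs (List.splitOnP_ne_nil sep xs)
      | cons b t => simp [List.modifyHead]
    · rw [if_neg h, if_neg h, ih]
      cases hs : xs.splitOnP sep with
      | nil => exact absurd hs (List.splitOnP_ne_nil sep xs)
      | cons b t => simp [List.modifyHead]

-- A reduced to a single combined split
theorem pvA_core (t : List Char) (split_newline split_pipe : Bool) :
    (let chunks : List (List Char) :=
      if split_newline then PySem.Chars.splitOn t ['\n'] else [t]
    chunks.foldl (fun parts chunk =>
      let cands : List (List Char) :=
        if split_pipe then PySem.Chars.splitOn chunk ['|'] else [chunk]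
      cands.foldl (fun parts part =>
        let part2 := PySem.Chars.strip part
        if part2 ≠ [] then parts ++ [String.ofList part2] else parts) parts) [])
    = (t.splitOnP (fun ch =>
        (split_newline && ch == '\n') || (split_pipe && ch == '|'))).flatMap pvEmit := by
  have hfold : ∀ (chunks : List (List Char)),
      chunks.foldl (fun parts chunk =>
        let cands : List (List Char) :=
          if split_pipe then PySem.Chars.splitOn chunk ['|'] else [chunk]
        cands.foldl (fun parts part =>
          let part2 := PySem.Chars.strip part
          if part2 ≠ [] then parts ++ [String.ofList part2] else parts) parts) []
      = chunks.flatMap (fun chunk =>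
          (if split_pipe then PySem.Chars.splitOn chunk ['|'] else [chunk]).flatMap pvEmit) := by
    intro chunks
    have h1 : chunks.foldl (fun parts chunk =>
        let cands : List (List Char) :=
          if split_pipe then PySem.Chars.splitOn chunk ['|'] else [chunk]
        cands.foldl (fun parts part =>
          let part2 := PySem.Chars.strip part
          if part2 ≠ [] then parts ++ [String.ofList part2] else parts) parts) []
        = chunks.foldl (fun parts chunk =>
            parts ++ (if split_pipe then PySem.Chars.splitOn chunk ['|'] else [chunk]).flatMap pvEmit) [] := by
      apply PySem.List.foldl_congr_mem
      intro acc chunk _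
      exact pvInnerFold _ acc
    rw [h1, PySem.List.foldl_append_eq_flatMap]
    simp
  show (if split_newline then PySem.Chars.splitOn t ['\n'] else [t]).foldl _ [] = _
  rw [hfold]
  cases split_newline <;> cases split_pipe <;>
    simp only [Bool.true_and, Bool.false_and, Bool.false_or, Bool.or_false,
      ite_true, ite_false, pvSplitOn_eq, pvBeqNl, pvBeqPipe]
  · -- no splitting at all
    have hfalse : t.splitOnP (fun _ => false) = [t] := by
      have := pvSplitOnP_append (fun _ => false) t [] (by simp)
      simpa [List.splitOnP_nil, List.modifyHead] using this
    simp [hfalse]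
  · -- pipe only
    simp
  · -- newline only
    simp
  · -- both: compose the two splits
    rw [← pvSplitOnP_or, List.flatMap_assoc]

-- ===== VERDICT (by name: the statement is the Claim_ definition above) =====
theorem split_filter_values_py_spec : Claim_equal_split_filter_values_py := by
  intro value split_newline split_pipe _
  unfold Spec_split_filter_values_py split_filter_values_py split_filter_values_py_alt
  by_cases h : PySem.Str.strip value = ""
  · simp [h]
  · simp only [h, if_neg, ite_false]
    rw [pvA_core, pvBFold]
    cases hs : ((PySem.Str.strip value).toList.splitOnP
        (fun ch => (split_newline && ch == '\n') || (split_pipe && ch == '|'))) with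
    | nil => exact absurd hs (List.splitOnP_ne_nil _ _)
    | cons b t => simp [List.modifyHead]
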